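-- pv_equiv track=rewrite | github.com/chennyso/agent | torchtitan/torchtitan/experiments/hybrid_policy/config_registry.py | _module_parts_from_stage_ranges
-- ===== SOURCE A (Python) =====
-- def _module_parts_from_stage_ranges(stage_ranges: list[tuple[int, int]]) -> list[list[str]]:
--     parts: list[list[str]] = []
--     for idx, (start, end) in enumerate(stage_ranges):
--         stage_modules: list[str] = []
--         if idx == 0:
--             stage_modules.append("tok_embeddings")
--         stage_modules.extend(f"layers.{layer_idx}" for layer_idx in range(start, end + 1))
--         if idx == len(stage_ranges) - 1:
--             stage_modules.extend(["norm", "output"])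
--         parts.append(stage_modules)
--     return parts
-- ===== SOURCE B (Python) =====
-- def _module_parts_from_stage_ranges(stage_ranges: list[tuple[int, int]]) -> list[list[str]]:
--     if not stage_ranges:
--         return []
--     # Build the whole pipeline's module sequence once, flat and in order.
--     segs = [[f"layers.{i}" for i in range(s, e + 1)] for s, e in stage_ranges]
--     flat = ["tok_embeddings"] + [m for seg in segs for m in seg] + ["norm", "output"]
--     # Stage sizes: the first stage absorbs the embedding, the last the norm/output pair.
--     sizes = [len(seg) for seg in segs]
--     sizes[0] += 1
--     sizes[-1] += 2
--     # Chop the flat sequence back into stages.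
--     out = []
--     for n in sizes:
--         out.append(flat[:n])
--         flat = flat[n:]
--     return out
-- ===== Notes on version B (the rewrite author's own statement) =====
-- stated objective: alternative
-- what changed: B builds the whole pipeline's module name sequence once as a single flat list (tok_embeddings, all layer names, norm, output), computes the per-stage sizes, and chops the flat list back into stages, instead of assembling each stage separately with idx==0/idx==last tests inside the loop.
import Mathlib
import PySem

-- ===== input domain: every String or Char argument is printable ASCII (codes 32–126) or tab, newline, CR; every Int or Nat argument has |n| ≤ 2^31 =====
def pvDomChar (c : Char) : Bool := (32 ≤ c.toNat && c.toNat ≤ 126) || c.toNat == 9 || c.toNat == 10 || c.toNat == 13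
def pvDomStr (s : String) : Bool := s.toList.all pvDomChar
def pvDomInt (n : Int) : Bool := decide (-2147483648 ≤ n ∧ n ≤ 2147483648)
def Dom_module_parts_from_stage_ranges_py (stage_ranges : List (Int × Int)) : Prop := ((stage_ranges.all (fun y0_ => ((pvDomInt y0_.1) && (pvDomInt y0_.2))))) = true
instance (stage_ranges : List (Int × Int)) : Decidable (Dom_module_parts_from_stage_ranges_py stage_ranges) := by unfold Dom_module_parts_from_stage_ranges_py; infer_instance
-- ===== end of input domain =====

-- B builds the whole pipeline's flat module sequence once and chops it back into stages by
-- size, instead of building each stage with idx == 0 / idx == last tests inside the loop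
-- (objective: alternative decomposition).

-- ===== PORT A =====
-- literal transliteration of A: foldl over enumerate, building each stage with in-loop branches
def module_parts_from_stage_ranges_py (stage_ranges : List (Int × Int)) : List (List String) :=
  (PySem.List.enumerate stage_ranges).foldl
    (fun parts p =>
      let idx := p.1
      let start := p.2.1
      let end_ := p.2.2
      let stage_modules : List String := if idx = 0 then ["tok_embeddings"] else []
      let stage_modules := stage_modules ++
        (PySem.List.pyRange start (end_ + 1) 1).map (fun layer_idx => "layers." ++ PySem.Int.toStr layer_idx)
      let stage_modules := if idx = (stage_ranges.length : Int) - 1 then stage_modules ++ ["norm", "output"] else stage_modules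
      parts ++ [stage_modules]) []

-- ===== PORT B =====
-- one raw segment: ["layers.start", …, "layers.end"]
def pvSeg (se : Int × Int) : List String :=
  (PySem.List.pyRange se.1 (se.2 + 1) 1).map (fun i => "layers." ++ PySem.Int.toStr i)

-- sizes[0] += 1
def pvAddHead (k : Int) : List Int → List Int
  | [] => []
  | n :: rest => (n + k) :: rest

-- sizes[-1] += 2
def pvAddLast (k : Int) : List Int → List Int
  | [] => []
  | [n] => [n + k]
  | n :: m :: rest => n :: pvAddLast k (m :: rest)

-- the chopping loop: out.append(flat[:n]); flat = flat[n:]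
def pvChop : List Int → List String → List (List String)
  | [], _ => []
  | n :: ns, flat =>
      PySem.List.slice flat none (some n) :: pvChop ns (PySem.List.slice flat (some n) none)

def module_parts_from_stage_ranges_py_alt (stage_ranges : List (Int × Int)) : List (List String) :=
  if stage_ranges = [] then []
  else
    let segs := stage_ranges.map pvSeg
    let flat := "tok_embeddings" :: segs.flatten ++ ["norm", "output"]
    let sizes := pvAddLast 2 (pvAddHead 1 (segs.map (fun seg => (seg.length : Int))))
    pvChop sizes flat

-- ===== PRECONDITION & SPEC =====
def Spec_module_parts_from_stage_ranges_py (stage_ranges : List (Int × Int)) (out : List (List String)) : Prop := out = module_parts_from_stage_ranges_py_alt stage_ranges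
instance (stage_ranges : List (Int × Int)) (out : List (List String)) : Decidable (Spec_module_parts_from_stage_ranges_py stage_ranges out) := by unfold Spec_module_parts_from_stage_ranges_py; infer_instance

-- ===== CLAIM (what is proved, stated in full; the proofs are below) =====
def Claim_equal_module_parts_from_stage_ranges_py : Prop := ∀ (stage_ranges : List (Int × Int)), Dom_module_parts_from_stage_ranges_py stage_ranges → Spec_module_parts_from_stage_ranges_py stage_ranges (module_parts_from_stage_ranges_py stage_ranges)

-- ===== LEMMAS AND PROOFS =====

-- proof-only reference form: every segment, first prefixed, last suffixed
def pvRefLast : List (List String) → List (List String)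
  | [] => []
  | [p] => [p ++ ["norm", "output"]]
  | p :: q :: rest => p :: pvRefLast (q :: rest)

-- A's append-to-an-accumulator loop is init ++ map of the body over the list
theorem pv_foldl_snoc {α β : Type} (f : α → β) (l : List α) (init : List β) :
    l.foldl (fun acc x => acc ++ [f x]) init = init ++ l.map f := by
  induction l generalizing init with
  | nil => simp
  | cons x xs ih => simp [List.foldl, ih, List.append_assoc]

-- from index 1 on, A's loop body is the uniform segment plus the last-stage fixup = pvRefLast
theorem pv_tail_eq (rest : List (Int × Int)) (k n : ℕ) (hk : 1 ≤ k) (h : k + rest.length = n) :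
    (PySem.List.enumerate rest (k : Int)).map
      (fun p => if p.1 = (n : Int) - 1
        then ((if p.1 = 0 then ["tok_embeddings"] else []) ++ pvSeg p.2) ++ ["norm", "output"]
        else (if p.1 = 0 then ["tok_embeddings"] else []) ++ pvSeg p.2)
      = pvRefLast (rest.map pvSeg) := by
  induction rest generalizing k with
  | nil => simp [PySem.List.enumerate_nil, pvRefLast]
  | cons x rest' ih =>
    cases rest' with
    | nil =>
      have h1 : (k : Int) = (n : Int) - 1 := by simp at h; omega
      have h0 : (k : Int) ≠ 0 := by omega
      simp [PySem.List.enumerate_cons, PySem.List.enumerate_nil, pvRefLast, h1]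
      omega
    | cons y rest'' =>
      have h1 : ((k : Int)) = (n : Int) - 1 → False := by simp at h; omega
      have h0 : ((k : Int)) = 0 → False := by omega
      have ih' := ih (k + 1) (by omega) (by simp at h ⊢; omega)
      push_cast at ih'
      rw [PySem.List.enumerate_cons]
      simp only [List.map_cons]
      rw [if_neg h1, if_neg h0]
      simp only [List.nil_append, pvRefLast]
      exact congrArg (pvSeg x :: ·) ih'

-- A = reference form
theorem pv_A_eq_ref (sr : List (Int × Int)) :
    module_parts_from_stage_ranges_py sr =
      match sr.map pvSeg with
      | [] => []
      | p :: rest => pvRefLast (("tok_embeddings" :: p) :: rest) := by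
  show (PySem.List.enumerate sr).foldl (fun parts (p : Int × (Int × Int)) => parts ++
      [if p.1 = (sr.length : Int) - 1
        then ((if p.1 = 0 then ["tok_embeddings"] else []) ++ pvSeg p.2) ++ ["norm", "output"]
        else (if p.1 = 0 then ["tok_embeddings"] else []) ++ pvSeg p.2]) [] = _
  rw [pv_foldl_snoc (fun p : Int × (Int × Int) => if p.1 = (sr.length : Int) - 1
        then ((if p.1 = 0 then ["tok_embeddings"] else []) ++ pvSeg p.2) ++ ["norm", "output"]
        else (if p.1 = 0 then ["tok_embeddings"] else []) ++ pvSeg p.2)]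
  cases sr with
  | nil => simp [PySem.List.enumerate_nil]
  | cons p rest =>
    cases rest with
    | nil =>
      simp [PySem.List.enumerate_cons, PySem.List.enumerate_nil, pvRefLast]
    | cons q rest' =>
      have h0 : ((0 : Int)) = (((p :: q :: rest').length : ℕ) : Int) - 1 → False := by simp; omega
      rw [PySem.List.enumerate_cons]
      simp only [List.map_cons, List.nil_append, zero_add]
      rw [if_neg h0]
      have ht := pv_tail_eq (q :: rest') 1 (p :: q :: rest').length (le_refl 1) (by simp; omega)
      push_cast at ht
      rw [ht]
      simp [pvRefLast]

-- chopping the flat tail with +2 on the last size reproduces pvRefLast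
theorem pv_chop_tail (L : List (List String)) (hL : L ≠ []) :
    pvChop (pvAddLast 2 (L.map (fun seg => (seg.length : Int)))) (L.flatten ++ ["norm", "output"])
      = pvRefLast L := by
  induction L with
  | nil => exact absurd rfl hL
  | cons l L' ih =>
    cases L' with
    | nil =>
      simp only [List.map_cons, List.map_nil, pvAddLast, List.flatten_cons, List.flatten_nil,
        List.append_nil, pvChop, pvRefLast]
      have h2 : ((l.length : Int) + 2) = ((l.length + 2 : ℕ) : Int) := by push_cast; ring
      rw [h2, PySem.List.slice_to_natCast, List.take_of_length_le (by simp)]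
    | cons m L'' =>
      have ih' := ih (by simp)
      simp only [List.map_cons, pvAddLast, List.flatten_cons, pvChop, pvRefLast]
      rw [PySem.List.slice_to_natCast, PySem.List.slice_from_natCast]
      rw [List.append_assoc, List.take_left' rfl, List.drop_left' rfl]
      simp only [List.map_cons, List.flatten_cons, List.append_assoc] at ih'
      simp only [List.append_assoc]
      exact congrArg (l :: ·) ih'

-- ===== VERDICT (by name: the statement is the Claim_ definition above) =====
theorem module_parts_from_stage_ranges_py_spec : Claim_equal_module_parts_from_stage_ranges_py := by
  intro sr _
  show module_parts_from_stage_ranges_py sr = module_parts_from_stage_ranges_py_alt sr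
  rw [pv_A_eq_ref]
  unfold module_parts_from_stage_ranges_py_alt
  cases sr with
  | nil => simp
  | cons p rest =>
    simp only [List.map_cons, if_neg (List.cons_ne_nil p rest)]
    rw [show pvAddHead 1 (((pvSeg p).length : Int) :: (rest.map pvSeg).map (fun seg => (seg.length : Int)))
        = ((("tok_embeddings" :: pvSeg p) :: rest.map pvSeg).map (fun seg => (seg.length : Int))) by
      simp [pvAddHead]]
    exact (pv_chop_tail (("tok_embeddings" :: pvSeg p) :: rest.map pvSeg) (by simp)).symm
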